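-- pv_equiv track=rewrite | github.com/onsuk/Programmers | 2018 서머윈터/방문길이/solution.py | ignore_visit_twice
-- ===== SOURCE A (Python) =====
-- def ignore_visit_twice(dirs):
--     res = []
--     current = (0, 0)
--     for dir in dirs:
--         if(dir == 'U'):
--             moved = (current[0], current[1]+1)
--             res.append([current, moved])
--             current = moved
--         elif(dir == 'D'):
--             moved = (current[0], current[1]-1)
--             res.append([current, moved])
--             current = moved
--         elif(dir == 'R'):
--             moved = (current[0]+1, current[1])
--             res.append([current, moved])
--             current = moved
--         elif(dir == 'L'):
--             moved = (current[0]-1, current[1])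
--             res.append([current, moved])
--             current = moved
--     return res
-- ===== SOURCE B (Python) =====
-- def ignore_visit_twice(dirs):
--     # Divide and conquer: edges of the whole string = edges of the left half
--     # plus edges of the right half translated by the left half's net displacement,
--     # which is computed in closed form from character counts.
--     if len(dirs) <= 1:
--         if dirs == 'U':
--             return [[(0, 0), (0, 1)]]
--         if dirs == 'D':
--             return [[(0, 0), (0, -1)]]
--         if dirs == 'R':
--             return [[(0, 0), (1, 0)]]
--         if dirs == 'L':
--             return [[(0, 0), (-1, 0)]]
--         return []
--     m = len(dirs) // 2
--     left, right = dirs[:m], dirs[m:]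
--     dx = left.count('R') - left.count('L')
--     dy = left.count('U') - left.count('D')
--     return ignore_visit_twice(left) + [
--         [(a + dx, b + dy), (c + dx, d + dy)]
--         for (a, b), (c, d) in ignore_visit_twice(right)
--     ]
-- ===== Notes on version B (the rewrite author's own statement) =====
-- stated objective: alternative
-- what changed: B replaces A's sequential position-tracking loop by a divide-and-conquer recursion: split the string in half, recurse on both halves, and translate the right half's edges by the left half's net displacement computed in closed form from character counts.
import Mathlib
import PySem

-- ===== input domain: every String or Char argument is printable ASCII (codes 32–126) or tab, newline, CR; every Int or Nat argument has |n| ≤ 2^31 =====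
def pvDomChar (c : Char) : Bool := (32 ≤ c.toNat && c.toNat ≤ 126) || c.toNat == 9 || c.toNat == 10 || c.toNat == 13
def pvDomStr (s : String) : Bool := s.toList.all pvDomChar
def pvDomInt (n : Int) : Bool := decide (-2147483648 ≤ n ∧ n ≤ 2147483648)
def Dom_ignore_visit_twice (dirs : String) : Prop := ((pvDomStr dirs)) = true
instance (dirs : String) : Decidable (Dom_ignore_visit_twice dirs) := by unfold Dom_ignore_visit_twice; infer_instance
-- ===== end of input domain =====

-- B replaces A's sequential position-tracking loop by divide-and-conquer: recurse on the
-- two halves of the string and translate the right half's edges by the left half's net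
-- displacement, computed in closed form from character counts (objective: alternative).

-- ===== PORT A =====
-- A's loop: accumulates edges res and the current position, one elif chain per direction.
def loopA : List Char → List (List (Int × Int)) → (Int × Int) → List (List (Int × Int))
  | [], res, _ => res
  | c :: rest, res, current =>
    if c = 'U' then
      let moved : Int × Int := (current.1, current.2 + 1)
      loopA rest (res ++ [[current, moved]]) moved
    else if c = 'D' then
      let moved : Int × Int := (current.1, current.2 - 1)
      loopA rest (res ++ [[current, moved]]) moved
    else if c = 'R' then
      let moved : Int × Int := (current.1 + 1, current.2)
      loopA rest (res ++ [[current, moved]]) moved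
    else if c = 'L' then
      let moved : Int × Int := (current.1 - 1, current.2)
      loopA rest (res ++ [[current, moved]]) moved
    else loopA rest res current

def ignore_visit_twice (dirs : String) : List (List (Int × Int)) :=
  loopA dirs.toList [] (0, 0)

-- ===== PORT B =====
-- Source B's recursion on the string (as List Char): base cases for length ≤ 1, otherwise
-- split at the midpoint, recurse, and translate the right half's edges; s.count(c) for a
-- single character is List.count; the per-edge translation of the two points of an edge
-- [(a,b),(c,d)] is ported as a map over the (two-element) edge list.
def edgesB (s : List Char) : List (List (Int × Int)) :=
  if h : s.length ≤ 1 then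
    if s = ['U'] then [[(0, 0), (0, 1)]]
    else if s = ['D'] then [[(0, 0), (0, -1)]]
    else if s = ['R'] then [[(0, 0), (1, 0)]]
    else if s = ['L'] then [[(0, 0), (-1, 0)]]
    else []
  else
    let m := s.length / 2
    let l := s.take m
    let r := s.drop m
    let dx : Int := (l.count 'R' : Int) - (l.count 'L' : Int)
    let dy : Int := (l.count 'U' : Int) - (l.count 'D' : Int)
    edgesB l ++ (edgesB r).map (fun e => e.map (fun p => (p.1 + dx, p.2 + dy)))
termination_by s.length
decreasing_by
  · simp only [List.length_take]; omega
  · simp only [List.length_drop]; omega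

def ignore_visit_twice_alt (dirs : String) : List (List (Int × Int)) :=
  edgesB dirs.toList

-- ===== PRECONDITION & SPEC =====
def Spec_ignore_visit_twice (dirs : String) (out : List (List (Int × Int))) : Prop := out = ignore_visit_twice_alt dirs
instance (dirs : String) (out : List (List (Int × Int))) : Decidable (Spec_ignore_visit_twice dirs out) := by unfold Spec_ignore_visit_twice; infer_instance

-- ===== CLAIM (what is proved, stated in full; the proofs are below) =====
def Claim_equal_ignore_visit_twice : Prop := ∀ (dirs : String), Dom_ignore_visit_twice dirs → Spec_ignore_visit_twice dirs (ignore_visit_twice dirs)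

-- ===== LEMMAS AND PROOFS =====

-- translate every point of an edge by v (proof vocabulary)
def tr (v : Int × Int) (e : List (Int × Int)) : List (Int × Int) :=
  e.map (fun p => (p.1 + v.1, p.2 + v.2))

theorem map_tr_tr (v w : Int × Int) (L : List (List (Int × Int))) :
    (L.map (tr w)).map (tr v) = L.map (tr (v.1 + w.1, v.2 + w.2)) := by
  rw [List.map_map]
  apply List.map_congr_left
  intro e _
  simp only [Function.comp, tr, List.map_map]
  apply List.map_congr_left
  intro p _
  simp [Prod.ext_iff]
  constructor <;> ring

-- A's edges written head-first (proof vocabulary)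
def edgesFrom : List Char → (Int × Int) → List (List (Int × Int))
  | [], _ => []
  | c :: rest, cur =>
    if c = 'U' then [cur, (cur.1, cur.2 + 1)] :: edgesFrom rest (cur.1, cur.2 + 1)
    else if c = 'D' then [cur, (cur.1, cur.2 - 1)] :: edgesFrom rest (cur.1, cur.2 - 1)
    else if c = 'R' then [cur, (cur.1 + 1, cur.2)] :: edgesFrom rest (cur.1 + 1, cur.2)
    else if c = 'L' then [cur, (cur.1 - 1, cur.2)] :: edgesFrom rest (cur.1 - 1, cur.2)
    else edgesFrom rest cur

theorem loopA_eq_edgesFrom (cs : List Char) (res : List (List (Int × Int))) (cur : Int × Int) :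
    loopA cs res cur = res ++ edgesFrom cs cur := by
  induction cs generalizing res cur with
  | nil => simp [loopA, edgesFrom]
  | cons c rest ih =>
    simp only [loopA, edgesFrom]
    split_ifs <;> rw [ih] <;> simp

-- edges from an arbitrary position are the edges from the origin, translated
theorem edgesFrom_shift (cs : List Char) (cur : Int × Int) :
    edgesFrom cs cur = (edgesFrom cs ((0 : Int), (0 : Int))).map (tr cur) := by
  induction cs generalizing cur with
  | nil => simp [edgesFrom]
  | cons c rest ih =>
    simp only [edgesFrom]
    by_cases hU : c = 'U'
    · subst hU
      simp only [reduceIte]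
      rw [ih (cur.1, cur.2 + 1), ih ((0 : Int), (0 : Int) + 1), List.map_cons, map_tr_tr]
      simp [tr, Prod.ext_iff, List.cons.injEq]
      omega
    by_cases hD : c = 'D'
    · subst hD
      simp only [if_neg hU, reduceIte]
      rw [ih (cur.1, cur.2 - 1), ih ((0 : Int), (0 : Int) - 1), List.map_cons, map_tr_tr]
      simp [tr, Prod.ext_iff, List.cons.injEq]
      exact ⟨by omega, by intros; omega⟩
    by_cases hR : c = 'R'
    · subst hR
      simp only [if_neg hU, if_neg hD, reduceIte]
      rw [ih (cur.1 + 1, cur.2), ih ((0 : Int) + 1, (0 : Int)), List.map_cons, map_tr_tr]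
      simp [tr, Prod.ext_iff, List.cons.injEq]
      omega
    by_cases hL : c = 'L'
    · subst hL
      simp only [if_neg hU, if_neg hD, if_neg hR, reduceIte]
      rw [ih (cur.1 - 1, cur.2), ih ((0 : Int) - 1, (0 : Int)), List.map_cons, map_tr_tr]
      simp [tr, Prod.ext_iff, List.cons.injEq]
      exact ⟨by omega, by intros; omega⟩
    · simp only [if_neg hU, if_neg hD, if_neg hR, if_neg hL]
      exact ih cur

-- A's final position (proof vocabulary)
def endPos : List Char → (Int × Int) → (Int × Int)
  | [], cur => cur
  | c :: rest, cur =>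
    if c = 'U' then endPos rest (cur.1, cur.2 + 1)
    else if c = 'D' then endPos rest (cur.1, cur.2 - 1)
    else if c = 'R' then endPos rest (cur.1 + 1, cur.2)
    else if c = 'L' then endPos rest (cur.1 - 1, cur.2)
    else endPos rest cur

theorem edgesFrom_append (l r : List Char) (cur : Int × Int) :
    edgesFrom (l ++ r) cur = edgesFrom l cur ++ edgesFrom r (endPos l cur) := by
  induction l generalizing cur with
  | nil => simp [edgesFrom, endPos]
  | cons c rest ih =>
    simp only [List.cons_append, edgesFrom, endPos]
    split_ifs <;> simp [ih]

theorem endPos_count (l : List Char) (cur : Int × Int) :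
    endPos l cur = (cur.1 + (l.count 'R' : Int) - (l.count 'L' : Int),
                    cur.2 + (l.count 'U' : Int) - (l.count 'D' : Int)) := by
  induction l generalizing cur with
  | nil => simp [endPos]
  | cons c rest ih =>
    by_cases hU : c = 'U'
    · subst hU
      simp [endPos, ih, Prod.ext_iff]
      all_goals omega
    by_cases hD : c = 'D'
    · subst hD
      simp [endPos, ih, Prod.ext_iff]
      all_goals omega
    by_cases hR : c = 'R'
    · subst hR
      simp [endPos, ih, Prod.ext_iff]
      all_goals omega
    by_cases hL : c = 'L'
    · subst hL
      simp [endPos, ih, Prod.ext_iff]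
      all_goals omega
    · simp [endPos, ih, hU, hD, hR, hL]

-- B's recursion computes A's origin edges.
theorem edgesB_eq (n : Nat) (s : List Char) (hs : s.length ≤ n) :
    edgesB s = edgesFrom s ((0 : Int), (0 : Int)) := by
  induction n generalizing s with
  | zero =>
    have : s = [] := by cases s <;> simp_all
    subst this
    simp [edgesB, edgesFrom]
  | succ n ih =>
    by_cases h : s.length ≤ 1
    · match s, h with
      | [], _ => simp [edgesB, edgesFrom]
      | [c], _ =>
        by_cases hU : c = 'U'
        · subst hU; simp [edgesB, edgesFrom]
        by_cases hD : c = 'D'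
        · subst hD; simp [edgesB, edgesFrom]
        by_cases hR : c = 'R'
        · subst hR; simp [edgesB, edgesFrom]
        by_cases hL : c = 'L'
        · subst hL; simp [edgesB, edgesFrom]
        · rw [edgesB]
          simp [edgesFrom, hU, hD, hR, hL]
    · rw [edgesB, dif_neg h]
      dsimp only
      have hm1 : 1 ≤ s.length / 2 := by omega
      have hm2 : s.length / 2 < s.length := by omega
      have hl : (s.take (s.length / 2)).length ≤ n := by
        simp only [List.length_take]; omega
      have hr : (s.drop (s.length / 2)).length ≤ n := by
        simp only [List.length_drop]; omega
      rw [ih _ hl, ih _ hr]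
      conv_rhs => rw [show s = s.take (s.length / 2) ++ s.drop (s.length / 2) from
        (List.take_append_drop _ s).symm]
      rw [edgesFrom_append, endPos_count]
      conv_rhs => rw [edgesFrom_shift (List.drop (s.length / 2) s)]
      congr 1
      simp [tr]

-- ===== VERDICT (by name: the statement is the Claim_ definition above) =====
theorem ignore_visit_twice_spec : Claim_equal_ignore_visit_twice := by
  intro dirs _
  unfold Spec_ignore_visit_twice ignore_visit_twice ignore_visit_twice_alt
  rw [loopA_eq_edgesFrom, edgesB_eq dirs.toList.length dirs.toList le_rfl]
  simp
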